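-- pv_equiv track=rewrite | github.com/kyeryoong/online-judge | Implementation/P67256.py | solution
-- ===== SOURCE A (Python) =====
-- def getDistance(left, right, target, hand):
--     ld = abs(target[0] - left[0]) + abs(target[1] - left[1])
--     rd = abs(target[0] - right[0]) + abs(target[1] - right[1])
--
--     # 오른손 엄지손가락이 더 가까운 경우
--     if ld > rd:
--         return "right"
--
--     # 왼손 엄지손가락이 더 가까운 경우
--     elif ld < rd:
--         return "left"
--
--     # 거리가 동일하면 주 손가락을 사용
--     elif ld == rd:
--         return hand
--
-- def solution(numbers, hand):
--     # 키패드의 위치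
--     key = {
--         1: [0, 0], 2: [0, 1], 3: [0, 2],
--         4: [1, 0], 5: [1, 1], 6: [1, 2],
--         7: [2, 0], 8: [2, 1], 9: [2, 2],
--         "*": [3, 0], 0: [3, 1], "#": [3, 2]
--     }
--
--
--     # 현재 왼손과 오른쪽 엄지손가락의 위치
--     l = key["*"]
--     r = key["#"]
--
--     answers = ""
--
--     for number in numbers:
--
--         # 1, 4, 7을 입력하는 경우 = 왼손 엄지손가락을 사용
--         if number in [1, 4, 7]:
--             l = key[number]
--             answers = answers + "L"
--
--         # 3, 6, 9을 입력하는 경우 = 오른손 엄지손가락을 사용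
--         elif number in [3, 6, 9]:
--             r = key[number]
--             answers = answers + "R"
--
--         # 2, 5, 8, 0을 입력하는 경우
--         else:
--
--             # 왼손 엄지손가락을 사용하는 경우
--             if getDistance(l, r, key[number], hand) == "left":
--                 l = key[number]
--                 answers = answers + "L"
--
--             # 오른손 엄지손가락을 사용하는 경우
--             else:
--                 r = key[number]
--                 answers = answers + "R"
--
--
--     return answers
-- ===== SOURCE B (Python) =====
-- def solution(numbers, hand):
--     # Stateless reformulation: no mutable thumb positions are maintained.
--     # Each press is decided purely from the history of (number, letter) presses
--     # so far: a thumb's current position is the position of the last key that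
--     # thumb pressed (scanning the history backwards), or its start position.
--     def pos(n):
--         return (3, 1) if n == 0 else divmod(n - 1, 3)
--
--     def press(n, history):
--         r, c = pos(n)
--         if c == 0:
--             return "L"
--         if c == 2:
--             return "R"
--         lp = next((pos(m) for m, ch in reversed(history) if ch == "L"), (3, 0))
--         rp = next((pos(m) for m, ch in reversed(history) if ch == "R"), (3, 2))
--         ld = abs(r - lp[0]) + abs(c - lp[1])
--         rd = abs(r - rp[0]) + abs(c - rp[1])
--         if ld != rd:
--             return "L" if ld < rd else "R"
--         return "L" if hand == "left" else "R"
--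
--     history = []
--     for n in numbers:
--         history.append((n, press(n, history)))
--     return "".join(ch for _, ch in history)
-- ===== Notes on version B (the rewrite author's own statement) =====
-- stated objective: alternative
-- what changed: B maintains no thumb-position state at all: each press is decided by a stateless function over the history of (number, letter) presses, recovering a thumb's position as the last key that thumb pressed (backward scan) or its start, with coordinates computed by divmod instead of A's dict; the output is joined from the history.
import Mathlib
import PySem

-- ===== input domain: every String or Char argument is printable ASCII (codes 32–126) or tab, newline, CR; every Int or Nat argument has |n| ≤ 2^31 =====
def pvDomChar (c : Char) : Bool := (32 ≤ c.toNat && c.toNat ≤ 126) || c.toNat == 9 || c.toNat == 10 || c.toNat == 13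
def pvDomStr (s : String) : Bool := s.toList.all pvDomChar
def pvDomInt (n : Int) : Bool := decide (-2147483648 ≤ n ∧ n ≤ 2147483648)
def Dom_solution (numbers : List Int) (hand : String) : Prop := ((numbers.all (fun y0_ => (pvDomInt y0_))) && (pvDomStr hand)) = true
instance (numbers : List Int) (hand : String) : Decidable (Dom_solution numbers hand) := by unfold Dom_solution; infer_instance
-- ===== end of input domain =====

-- B drops A's mutable thumb-position state: each press is decided by a stateless function
-- over the press history (a thumb's position = last key it pressed, or its start), with
-- divmod coordinates instead of A's dict (objective: alternative; not faster).

-- ===== PORT A =====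
-- the int-keyed entries of A's mixed-key dict `key`; the two string-keyed entries
-- key["*"] = [3,0] and key["#"] = [3,2] are only looked up at literal keys and are
-- inlined as those literals below.
def keyA : PySem.Dict Int (Int × Int) :=
  PySem.Dict.ofList [(1,(0,0)),(2,(0,1)),(3,(0,2)),(4,(1,0)),(5,(1,1)),(6,(1,2)),
                     (7,(2,0)),(8,(2,1)),(9,(2,2)),(0,(3,1))]

def getDistanceA (left right target : Int × Int) (hand : String) : String :=
  let ld := |target.1 - left.1| + |target.2 - left.2|
  let rd := |target.1 - right.1| + |target.2 - right.2|
  if ld > rd then "right"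
  else if ld < rd then "left"
  else hand

-- one iteration of A's for-loop over (l, r, answers).  key[number] raises KeyError when
-- number ∉ {0..9} — those inputs are outside Pre_solution; getD's default is never read there.
def stepA (hand : String) (st : (Int × Int) × (Int × Int) × String) (number : Int) :
    (Int × Int) × (Int × Int) × String :=
  if number ∈ ([1, 4, 7] : List Int) then
    (keyA.getD number (0, 0), st.2.1, st.2.2 ++ "L")
  else if number ∈ ([3, 6, 9] : List Int) then
    (st.1, keyA.getD number (0, 0), st.2.2 ++ "R")
  else if getDistanceA st.1 st.2.1 (keyA.getD number (0, 0)) hand = "left" then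
    (keyA.getD number (0, 0), st.2.1, st.2.2 ++ "L")
  else
    (st.1, keyA.getD number (0, 0), st.2.2 ++ "R")

def solution (numbers : List Int) (hand : String) : String :=
  (numbers.foldl (stepA hand) (((3, 0), (3, 2), ""))).2.2

-- ===== PORT B =====
-- pos(n): (3,1) for 0, else divmod(n-1, 3)
def posB (n : Int) : Int × Int :=
  if n == 0 then (3, 1) else (PySem.Int.floordiv (n - 1) 3, PySem.Int.mod (n - 1) 3)

-- next((pos(m) for m, ch in reversed(history) if ch == letter), start)
def thumbB (history : List (Int × String)) (letter : String) (start : Int × Int) : Int × Int :=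
  match history.reverse.find? (fun p => p.2 == letter) with
  | some p => posB p.1
  | none => start

-- press(n, history): the letter chosen for key n given the press history
def pressB (hand : String) (n : Int) (history : List (Int × String)) : String :=
  let rc := posB n
  if rc.2 == 0 then "L"
  else if rc.2 == 2 then "R"
  else
    let lp := thumbB history "L" (3, 0)
    let rp := thumbB history "R" (3, 2)
    let ld := |rc.1 - lp.1| + |rc.2 - lp.2|
    let rd := |rc.1 - rp.1| + |rc.2 - rp.2|
    if ld ≠ rd then (if ld < rd then "L" else "R")
    else if hand == "left" then "L" else "R"

def solution_alt (numbers : List Int) (hand : String) : String :=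
  let history := numbers.foldl (fun h n => h ++ [(n, pressB hand n h)]) []
  PySem.Str.join "" (history.map Prod.snd)

-- ===== PRECONDITION & SPEC =====
-- A raises KeyError (key[number]) on any number outside 0..9; exactly those inputs are excluded.
def Pre_solution (numbers : List Int) (hand : String) : Prop :=
  ∀ n ∈ numbers, 0 ≤ n ∧ n ≤ 9

instance (numbers : List Int) (hand : String) : Decidable (Pre_solution numbers hand) := by
  unfold Pre_solution; infer_instance

def pvWitness_solution : List Int × String := ([1, 3, 4, 5, 8, 2, 1, 4, 5, 9, 5], "right")

def Spec_solution (numbers : List Int) (hand : String) (out : String) : Prop := out = solution_alt numbers hand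
instance (numbers : List Int) (hand : String) (out : String) : Decidable (Spec_solution numbers hand out) := by unfold Spec_solution; infer_instance

-- ===== CLAIM (what is proved, stated in full; the proofs are below) =====
def Claim_equal_solution : Prop := ∀ (numbers : List Int) (hand : String), Dom_solution numbers hand → Pre_solution numbers hand → Spec_solution numbers hand (solution numbers hand)

-- ===== LEMMAS AND PROOFS =====

theorem flatten_intersperse_nil {α : Type} : ∀ xs : List (List α),
    (List.intersperse ([] : List α) xs).flatten = xs.flatten
  | [] => rfl
  | [_] => by simp
  | x :: y :: t => by
      rw [show List.intersperse ([] : List α) (x :: y :: t) =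
            x :: [] :: List.intersperse [] (y :: t) from rfl]
      simp [flatten_intersperse_nil (y :: t)]

theorem join_snoc (l : List String) (a : String) :
    PySem.Str.join "" (l ++ [a]) = PySem.Str.join "" l ++ a := by
  apply String.toList_injective
  simp [PySem.Str.toList_join, PySem.Chars.join, List.intercalate,
    flatten_intersperse_nil]

theorem thumb_snoc (h : List (Int × String)) (n : Int) (ch letter : String)
    (start : Int × Int) :
    thumbB (h ++ [(n, ch)]) letter start =
      if ch == letter then posB n else thumbB h letter start := by
  simp only [thumbB, List.reverse_append, List.reverse_cons, List.reverse_nil,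
    List.nil_append, List.cons_append, List.find?]
  by_cases hc : ch == letter <;> simp [hc]


-- pressB always answers "L" or "R"
theorem press_cases (hand : String) (n : Int) (h : List (Int × String)) :
    pressB hand n h = "L" ∨ pressB hand n h = "R" := by
  simp only [pressB]
  split_ifs <;> simp

-- on a middle-column key, pressB chooses "L" exactly when A's getDistance says "left"
theorem press_left_iff (hand : String) (h : List (Int × String)) (n : Int)
    (hcol : (posB n).2 = 1) (hk : keyA.getD n (0, 0) = posB n) :
    (pressB hand n h = "L") ↔
      getDistanceA (thumbB h "L" (3, 0)) (thumbB h "R" (3, 2)) (keyA.getD n (0, 0)) hand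
        = "left" := by
  rw [hk]
  simp only [pressB, getDistanceA, hcol]
  norm_num
  rcases lt_trichotomy
      (|(posB n).1 - (thumbB h "L" (3, 0)).1| + |1 - (thumbB h "L" (3, 0)).2|)
      (|(posB n).1 - (thumbB h "R" (3, 2)).1| + |1 - (thumbB h "R" (3, 2)).2|) with hlt | heq | hgt
  · simp [hlt, ne_of_lt hlt, not_lt.mpr (le_of_lt hlt)]
  · by_cases hh : hand = "left" <;> simp [heq, hh]
  · have : ¬ (|(posB n).1 - (thumbB h "L" (3, 0)).1| + |1 - (thumbB h "L" (3, 0)).2| <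
        |(posB n).1 - (thumbB h "R" (3, 2)).1| + |1 - (thumbB h "R" (3, 2)).2|) :=
      not_lt.mpr (le_of_lt hgt)
    simp [hgt, ne_of_gt hgt, this]

-- the step correspondence on a left-column key
theorem step_left (hand : String) (h : List (Int × String)) (n : Int)
    (hmem : n ∈ ([1, 4, 7] : List Int)) (hp : pressB hand n h = "L")
    (hk : keyA.getD n (0, 0) = posB n) :
    stepA hand (thumbB h "L" (3, 0), thumbB h "R" (3, 2),
        PySem.Str.join "" (h.map Prod.snd)) n =
      (thumbB (h ++ [(n, pressB hand n h)]) "L" (3, 0),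
       thumbB (h ++ [(n, pressB hand n h)]) "R" (3, 2),
       PySem.Str.join "" ((h ++ [(n, pressB hand n h)]).map Prod.snd)) := by
  simp only [stepA]
  rw [if_pos hmem]
  simp [hp, thumb_snoc, hk, join_snoc]

-- the step correspondence on a right-column key
theorem step_right (hand : String) (h : List (Int × String)) (n : Int)
    (hmem1 : n ∉ ([1, 4, 7] : List Int)) (hmem2 : n ∈ ([3, 6, 9] : List Int))
    (hp : pressB hand n h = "R") (hk : keyA.getD n (0, 0) = posB n) :
    stepA hand (thumbB h "L" (3, 0), thumbB h "R" (3, 2),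
        PySem.Str.join "" (h.map Prod.snd)) n =
      (thumbB (h ++ [(n, pressB hand n h)]) "L" (3, 0),
       thumbB (h ++ [(n, pressB hand n h)]) "R" (3, 2),
       PySem.Str.join "" ((h ++ [(n, pressB hand n h)]).map Prod.snd)) := by
  simp only [stepA]
  rw [if_neg hmem1, if_pos hmem2]
  simp [hp, thumb_snoc, hk, join_snoc]

-- the step correspondence on a middle-column key
theorem step_mid (hand : String) (h : List (Int × String)) (n : Int)
    (hmem1 : n ∉ ([1, 4, 7] : List Int)) (hmem2 : n ∉ ([3, 6, 9] : List Int))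
    (hcol : (posB n).2 = 1) (hk : keyA.getD n (0, 0) = posB n) :
    stepA hand (thumbB h "L" (3, 0), thumbB h "R" (3, 2),
        PySem.Str.join "" (h.map Prod.snd)) n =
      (thumbB (h ++ [(n, pressB hand n h)]) "L" (3, 0),
       thumbB (h ++ [(n, pressB hand n h)]) "R" (3, 2),
       PySem.Str.join "" ((h ++ [(n, pressB hand n h)]).map Prod.snd)) := by
  have hiff := press_left_iff hand h n hcol hk
  rcases press_cases hand n h with hp | hp
  · rw [hp] at hiff ⊢
    simp only [stepA]
    rw [if_neg hmem1, if_neg hmem2, if_pos (hiff.mp rfl)]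
    simp [thumb_snoc, hk, join_snoc]
  · rw [hp] at hiff ⊢
    have hnot : ¬ getDistanceA (thumbB h "L" (3, 0)) (thumbB h "R" (3, 2))
        (keyA.getD n (0, 0)) hand = "left" := fun hc => by
      have := hiff.mpr hc; simp at this
    simp only [stepA]
    rw [if_neg hmem1, if_neg hmem2, if_neg hnot]
    simp [thumb_snoc, hk, join_snoc]

theorem press_col0 (hand : String) (h : List (Int × String)) (n : Int)
    (hcol : (posB n).2 = 0) : pressB hand n h = "L" := by
  simp [pressB, hcol]

theorem press_col2 (hand : String) (h : List (Int × String)) (n : Int)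
    (hcol : (posB n).2 = 2) : pressB hand n h = "R" := by
  simp [pressB, hcol]

theorem step_rel (hand : String) (n : Int) (h0 : 0 ≤ n) (h9 : n ≤ 9)
    (h : List (Int × String)) :
    stepA hand (thumbB h "L" (3, 0), thumbB h "R" (3, 2),
        PySem.Str.join "" (h.map Prod.snd)) n =
      (thumbB (h ++ [(n, pressB hand n h)]) "L" (3, 0),
       thumbB (h ++ [(n, pressB hand n h)]) "R" (3, 2),
       PySem.Str.join "" ((h ++ [(n, pressB hand n h)]).map Prod.snd)) := by
  interval_cases n
  · exact step_mid hand h 0 (by decide) (by decide) (by decide) (by decide)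
  · exact step_left hand h 1 (by decide) (press_col0 hand h 1 (by decide)) (by decide)
  · exact step_mid hand h 2 (by decide) (by decide) (by decide) (by decide)
  · exact step_right hand h 3 (by decide) (by decide) (press_col2 hand h 3 (by decide)) (by decide)
  · exact step_left hand h 4 (by decide) (press_col0 hand h 4 (by decide)) (by decide)
  · exact step_mid hand h 5 (by decide) (by decide) (by decide) (by decide)
  · exact step_right hand h 6 (by decide) (by decide) (press_col2 hand h 6 (by decide)) (by decide)
  · exact step_left hand h 7 (by decide) (press_col0 hand h 7 (by decide)) (by decide)
  · exact step_mid hand h 8 (by decide) (by decide) (by decide) (by decide)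
  · exact step_right hand h 9 (by decide) (by decide) (press_col2 hand h 9 (by decide)) (by decide)

theorem loop_eq (hand : String) : ∀ (ns : List Int) (h : List (Int × String)),
    (∀ n ∈ ns, 0 ≤ n ∧ n ≤ 9) →
    ns.foldl (stepA hand)
        (thumbB h "L" (3, 0), thumbB h "R" (3, 2), PySem.Str.join "" (h.map Prod.snd)) =
      (thumbB (ns.foldl (fun h n => h ++ [(n, pressB hand n h)]) h) "L" (3, 0),
       thumbB (ns.foldl (fun h n => h ++ [(n, pressB hand n h)]) h) "R" (3, 2),
       PySem.Str.join ""
         ((ns.foldl (fun h n => h ++ [(n, pressB hand n h)]) h).map Prod.snd))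
  | [], _, _ => rfl
  | n :: ns, h, hpre => by
      have hn := hpre n (List.mem_cons_self)
      simp only [List.foldl_cons]
      rw [step_rel hand n hn.1 hn.2 h]
      exact loop_eq hand ns _ (fun m hm => hpre m (List.mem_cons_of_mem _ hm))

-- ===== VERDICT (by name: the statement is the Claim_ definition above) =====
theorem solution_spec : Claim_equal_solution := by
  intro numbers hand _ hpre
  unfold Spec_solution solution solution_alt
  have h := loop_eq hand numbers [] hpre
  simp only [thumbB, List.reverse_nil, List.find?, List.map_nil] at h
  rw [show PySem.Str.join "" ([] : List String) = "" from rfl] at h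
  rw [h]
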